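-- pv_equiv track=rewrite | github.com/eun-byeol/algorithm | python/implementation/파괴되지_않은_건물.py | solution
-- ===== SOURCE A (Python) =====
-- def solution(board, skill):
--     answer = 0
--     N = len(board)
--     M = len(board[0])
--     prefix_sum = [[0] * (M+1) for _ in range(N+1)]
--
--     for t, r1, c1, r2, c2, d in skill:
--         if t == 1:
--             d *= -1
--         prefix_sum[r1][c1] += d
--         prefix_sum[r2+1][c2+1] += d
--         prefix_sum[r1][c2+1] += -d
--         prefix_sum[r2+1][c1] += -d
--
--     for i in range(N):
--         for j in range(M):
--             prefix_sum[i][j+1] += prefix_sum[i][j]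
--
--     for j in range(M):
--         for i in range(N):
--             prefix_sum[i+1][j] += prefix_sum[i][j]
--
--     for i in range(N):
--         for j in range(M):
--             board[i][j] += prefix_sum[i][j]
--             if board[i][j] > 0:
--                 answer += 1
--     return answer
-- ===== SOURCE B (Python) =====
-- def solution(board, skill):
--     # Direct application: add each skill's delta to every cell of its rectangle,
--     # then count cells > 0.  (Mutates board in place, like the original.)
--     for t, r1, c1, r2, c2, d in skill:
--         val = -d if t == 1 else d
--         for i in range(r1, r2 + 1):
--             row = board[i]
--             for j in range(c1, c2 + 1):
--                 row[j] += val
--     return sum(1 for row in board for v in row if v > 0)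
-- ===== Notes on version B (the rewrite author's own statement) =====
-- stated objective: simpler
-- what changed: B applies each damage rectangle directly to the board cells and counts positives in one sweep, instead of A's 2D difference array with row and column prefix-sum passes.
-- outside the precondition, e.g. on solution([[1], [1], [1]], [[0, 2, 0, 0, 0, 5]]): A returns 2, B returns 3; on solution([[1, 1], [1, 1]], [[1, -1, 0, -1, 0, 5]]): A returns 4, B returns 3; on solution([[1], [1, 5]], []): A returns 2, B returns 3
import Mathlib
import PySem

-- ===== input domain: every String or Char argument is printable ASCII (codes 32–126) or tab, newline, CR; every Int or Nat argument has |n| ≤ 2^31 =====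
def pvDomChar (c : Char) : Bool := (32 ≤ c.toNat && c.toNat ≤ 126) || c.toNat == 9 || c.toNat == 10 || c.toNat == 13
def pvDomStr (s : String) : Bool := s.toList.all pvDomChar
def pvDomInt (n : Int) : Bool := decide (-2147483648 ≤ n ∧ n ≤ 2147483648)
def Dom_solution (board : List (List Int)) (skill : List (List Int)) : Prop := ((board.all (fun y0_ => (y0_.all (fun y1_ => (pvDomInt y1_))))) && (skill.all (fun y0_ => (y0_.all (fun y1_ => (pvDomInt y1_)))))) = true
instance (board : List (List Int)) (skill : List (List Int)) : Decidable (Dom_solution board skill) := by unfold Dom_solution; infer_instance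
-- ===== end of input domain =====

-- B replaces A's 2D difference-array + prefix-sum passes by directly adding each
-- skill rectangle to the board and counting positive cells (objective: simpler).
-- Both Pythons mutate `board` in place; the equivalence proved here is about the
-- RETURN value only.

-- ===== PORT A =====
-- shared rendering of Python's `m[i][j] += d` on a 2D list: negative indices wrap
-- (Python semantics); an out-of-range index raises in Python and is a no-op here,
-- exact on Pre_ (all touched indices are in range there).
def pidx (n : Nat) (i : Int) : Nat := if i < 0 then ((n : Int) + i).toNat else i.toNat

def addAt2 (m : List (List Int)) (i j d : Int) : List (List Int) :=
  m.modify (pidx m.length i) (fun row => row.modify (pidx row.length j) (· + d))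

-- `m[i][j]` read (in range on all uses inside Pre_)
def get2 (m : List (List Int)) (i j : Nat) : Int := (m.getD i []).getD j 0

-- body of A's `for t, r1, c1, r2, c2, d in skill:` loop (Python raises on a skill
-- row not of length 6; such inputs are excluded by Pre_)
def stepA (ps : List (List Int)) (s : List Int) : List (List Int) :=
  match s with
  | [t, r1, c1, r2, c2, d] =>
    let d := if t = 1 then -d else d
    addAt2 (addAt2 (addAt2 (addAt2 ps r1 c1 d) (r2+1) (c2+1) d) r1 (c2+1) (-d)) (r2+1) c1 (-d)
  | _ => ps

-- body of A's row prefix pass for one i:  `for j in range(M): ps[i][j+1] += ps[i][j]`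
def rowPass (M : Nat) (ps : List (List Int)) (i : Nat) : List (List Int) :=
  (List.range M).foldl (fun ps (j : Nat) => addAt2 ps (i:Int) ((j:Int)+1) (get2 ps i j)) ps

-- body of A's column prefix pass for one j:  `for i in range(N): ps[i+1][j] += ps[i][j]`
def colPass (N : Nat) (ps : List (List Int)) (j : Nat) : List (List Int) :=
  (List.range N).foldl (fun ps (i : Nat) => addAt2 ps ((i:Int)+1) (j:Int) (get2 ps i j)) ps

def solution (board : List (List Int)) (skill : List (List Int)) : Int :=
  let N := board.length
  let M := (board.headD []).length
  let ps0 : List (List Int) := List.replicate (N+1) (List.replicate (M+1) (0:Int))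
  let ps1 := skill.foldl stepA ps0
  let ps2 := (List.range N).foldl (rowPass M) ps1
  let ps3 := (List.range M).foldl (colPass N) ps2
  (List.range N).foldl (fun a (i : Nat) =>
    (List.range M).foldl (fun a (j : Nat) =>
      if get2 board i j + get2 ps3 i j > 0 then a + 1 else a) a) 0

-- ===== PORT B =====
-- body of B's skill loop: add val to every cell of the rectangle
def stepB (b : List (List Int)) (s : List Int) : List (List Int) :=
  match s with
  | [t, r1, c1, r2, c2, d] =>
    let val := if t = 1 then -d else d
    (PySem.List.pyRange r1 (r2+1) 1).foldl (fun b i =>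
      (PySem.List.pyRange c1 (c2+1) 1).foldl (fun b j => addAt2 b i j val) b) b
  | _ => b

def solution_alt (board : List (List Int)) (skill : List (List Int)) : Int :=
  let board' := skill.foldl stepB board
  board'.foldl (fun a row => row.foldl (fun a v => if v > 0 then a + 1 else a) a) 0

-- ===== PRECONDITION & SPEC =====
-- Pre_ restricts to the task's natural domain: a nonempty rectangular board and
-- skills of shape [t,r1,c1,r2,c2,d] describing an in-bounds rectangle with
-- r1 ≤ r2, c1 ≤ c2.  Outside it A raises (ragged-short rows, wrong-length skill
-- rows, indices past the arrays) or returns an accidental value (an inverted or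
-- negative-index rectangle fed through the difference array, extra cells of
-- ragged-long rows silently ignored) — see the claim's cited examples.
def Pre_solution (board : List (List Int)) (skill : List (List Int)) : Prop :=
  board ≠ [] ∧ (∀ row ∈ board, row.length = (board.headD []).length) ∧
  ∀ s ∈ skill, s.length = 6 ∧
    0 ≤ s.getD 1 0 ∧ s.getD 1 0 ≤ s.getD 3 0 ∧ s.getD 3 0 < (board.length : Int) ∧
    0 ≤ s.getD 2 0 ∧ s.getD 2 0 ≤ s.getD 4 0 ∧ s.getD 4 0 < ((board.headD []).length : Int)

instance (board : List (List Int)) (skill : List (List Int)) : Decidable (Pre_solution board skill) := by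
  unfold Pre_solution; infer_instance

def pvWitness_solution : List (List Int) × List (List Int) :=
  ([[1, -2], [0, 3]], [[1, 0, 0, 1, 1, 2], [2, 0, 1, 1, 1, 5]])

def Spec_solution (board : List (List Int)) (skill : List (List Int)) (out : Int) : Prop := out = solution_alt board skill
instance (board : List (List Int)) (skill : List (List Int)) (out : Int) : Decidable (Spec_solution board skill out) := by unfold Spec_solution; infer_instance

-- ===== CLAIM (what is proved, stated in full; the proofs are below) =====
def Claim_equal_solution : Prop := ∀ (board : List (List Int)) (skill : List (List Int)), Dom_solution board skill → Pre_solution board skill → Spec_solution board skill (solution board skill)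

-- ===== LEMMAS AND PROOFS =====

-- m has N rows, each of length M
def Shape (m : List (List Int)) (N M : Nat) : Prop :=
  m.length = N ∧ ∀ a, a < N → (m.getD a []).length = M

-- the per-skill delta a cell (a,b) receives
def rectDelta (s : List Int) (a b : Nat) : Int :=
  match s with
  | [t, r1, c1, r2, c2, d] =>
    if r1 ≤ (a:Int) ∧ (a:Int) ≤ r2 ∧ c1 ≤ (b:Int) ∧ (b:Int) ≤ c2 then (if t = 1 then -d else d) else 0
  | _ => 0

-- indicator of the single integer point x at coordinate a
def pt (x : Int) (a : Nat) : Int := if x = (a:Int) then 1 else 0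

-- the per-skill delta of A's difference array at (a,b), in factored form
def d4 (s : List Int) (a b : Nat) : Int :=
  match s with
  | [t, r1, c1, r2, c2, d] =>
    (if t = 1 then -d else d) * (pt r1 a - pt (r2+1) a) * (pt c1 b - pt (c2+1) b)
  | _ => 0

def SkOK (N M : Nat) (s : List Int) : Prop :=
  s.length = 6 ∧ 0 ≤ s.getD 1 0 ∧ s.getD 1 0 ≤ s.getD 3 0 ∧ s.getD 3 0 < (N:Int) ∧
    0 ≤ s.getD 2 0 ∧ s.getD 2 0 ≤ s.getD 4 0 ∧ s.getD 4 0 < (M:Int)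

lemma exists_six (s : List Int) (h : s.length = 6) :
    ∃ t r1 c1 r2 c2 d, s = [t, r1, c1, r2, c2, d] := by
  match s, h with
  | [t, r1, c1, r2, c2, d], _ => exact ⟨t, r1, c1, r2, c2, d, rfl⟩

lemma getD_modify_add (l : List Int) (k : Nat) (d : Int) (b : Nat) (hb : b < l.length) :
    (l.modify k (· + d)).getD b 0 = l.getD b 0 + if k = b then d else 0 := by
  simp only [List.getD_eq_getElem?_getD, List.getElem?_modify]
  rcases Nat.lt_or_ge b l.length with h | h
  · simp only [List.getElem?_eq_getElem h]
    split_ifs <;> simp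
  · omega

lemma get2_addAt2 (m : List (List Int)) (i j d : Int) (a b : Nat)
    (hi : 0 ≤ i) (hj : 0 ≤ j) (ha : a < m.length) (hb : b < (m.getD a []).length) :
    get2 (addAt2 m i j d) a b = get2 m a b + if i = (a:Int) ∧ j = (b:Int) then d else 0 := by
  have hi' : ¬ i < 0 := by omega
  have hj' : ¬ j < 0 := by omega
  rw [show m.getD a [] = m[a] from List.getD_eq_getElem m [] ha] at hb
  simp only [addAt2, get2, pidx, if_neg hi', if_neg hj']
  rw [List.getD_eq_getElem?_getD (l := m.modify _ _), List.getElem?_modify,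
    List.getElem?_eq_getElem ha]
  by_cases hk : i.toNat = a
  · have hia : i = (a : Int) := by omega
    simp only [hk, if_true, Option.map_eq_map, Option.map_some, Option.getD_some]
    rw [getD_modify_add m[a] j.toNat d b hb,
      show m.getD a [] = m[a] from List.getD_eq_getElem m [] ha]
    by_cases hjb : j = (b:Int)
    · have h2 : j.toNat = b := by omega
      simp [hjb, hia]
    · have h2 : ¬ (j.toNat = b) := by omega
      simp [h2, hjb]
  · have hia : ¬ (i = (a : Int)) := by omega
    simp only [if_neg hk, Option.map_eq_map, Option.map_some, Option.getD_some,
      show m.getD a [] = m[a] from List.getD_eq_getElem m [] ha]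
    simp [hia]

lemma length_addAt2 (m : List (List Int)) (i j d : Int) :
    (addAt2 m i j d).length = m.length := by
  simp [addAt2, List.length_modify]

lemma shape_addAt2 {m : List (List Int)} {N M : Nat} (h : Shape m N M) (i j d : Int) :
    Shape (addAt2 m i j d) N M := by
  obtain ⟨hl, hr⟩ := h
  refine ⟨by simpa [length_addAt2] using hl, ?_⟩
  intro a ha
  have ham : a < m.length := by omega
  have hrow := hr a ha
  simp only [addAt2]
  rw [List.getD_eq_getElem?_getD, List.getElem?_modify, List.getElem?_eq_getElem ham]
  simp only [Option.map_eq_map, Option.map_some, Option.getD_some]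
  split_ifs with hk
  · rw [List.length_modify, ← List.getD_eq_getElem m [] ham]; exact hrow
  · rw [← List.getD_eq_getElem m [] ham]; exact hrow

lemma shape_foldl {α : Type} {N M : Nat} (f : List (List Int) → α → List (List Int))
    (l : List α) (m : List (List Int)) (h : Shape m N M)
    (hf : ∀ m' x, x ∈ l → Shape m' N M → Shape (f m' x) N M) :
    Shape (l.foldl f m) N M := by
  induction l generalizing m with
  | nil => exact h
  | cons x xs ih =>
    exact ih (f m x) (hf m x (by simp) h) (fun m' y hy => hf m' y (by simp [hy]))

lemma sum_pt (x : Int) (hx : 0 ≤ x) (a : Nat) :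
    (∑ i ∈ Finset.range (a+1), pt x i) = if x ≤ (a:Int) then 1 else 0 := by
  induction a with
  | zero => rw [Finset.sum_range_one]; simp only [pt, Nat.cast_zero]; split_ifs <;> omega
  | succ a ih =>
    rw [Finset.sum_range_succ, ih]
    simp only [pt]
    split_ifs <;> push_cast <;> omega

lemma shape_ps0 (N M : Nat) :
    Shape (List.replicate (N+1) (List.replicate (M+1) (0:Int))) (N+1) (M+1) := by
  refine ⟨List.length_replicate, fun a ha => ?_⟩
  rw [List.getD_eq_getElem?_getD, List.getElem?_replicate, if_pos ha]
  simp

lemma get2_ps0 (N M a b : Nat) :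
    get2 (List.replicate (N+1) (List.replicate (M+1) (0:Int))) a b = 0 := by
  simp only [get2, List.getD_eq_getElem?_getD, List.getElem?_replicate]
  split_ifs <;> simp [List.getD_eq_getElem?_getD, List.getElem?_replicate] <;> split_ifs <;> simp

lemma shape_stepA {ps : List (List Int)} {N M : Nat} (h : Shape ps N M) (s : List Int) :
    Shape (stepA ps s) N M := by
  unfold stepA
  split
  · exact shape_addAt2 (shape_addAt2 (shape_addAt2 (shape_addAt2 h _ _ _) _ _ _) _ _ _) _ _ _
  · exact h

lemma get2_stepA (ps : List (List Int)) (N M : Nat) (s : List Int) (hs : SkOK N M s)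
    (hS : Shape ps (N+1) (M+1)) (a b : Nat) (ha : a ≤ N) (hb : b ≤ M) :
    get2 (stepA ps s) a b = get2 ps a b + d4 s a b := by
  obtain ⟨hlen, h1, h2, h3, h4, h5, h6⟩ := hs
  obtain ⟨t, r1, c1, r2, c2, d, rfl⟩ := exists_six _ hlen
  simp only [List.getD_cons_succ, List.getD_cons_zero] at h1 h2 h3 h4 h5 h6
  have key : ∀ (m : List (List Int)), Shape m (N+1) (M+1) → ∀ (i j dd : Int), 0 ≤ i → 0 ≤ j →
      get2 (addAt2 m i j dd) a b = get2 m a b + if i = (a:Int) ∧ j = (b:Int) then dd else 0 := by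
    intro m hSm i j dd hi hj
    refine get2_addAt2 m i j dd a b hi hj ?_ ?_
    · have := hSm.1; omega
    · rw [hSm.2 a (by omega)]; omega
  have S1 := shape_addAt2 hS r1 c1 (if t = 1 then -d else d)
  have S2 := shape_addAt2 S1 (r2+1) (c2+1) (if t = 1 then -d else d)
  have S3 := shape_addAt2 S2 r1 (c2+1) (-(if t = 1 then -d else d))
  simp only [stepA, d4]
  rw [key _ S3 (r2+1) c1 _ (by omega) (by omega),
      key _ S2 r1 (c2+1) _ (by omega) (by omega),
      key _ S1 (r2+1) (c2+1) _ (by omega) (by omega),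
      key _ hS r1 c1 _ (by omega) (by omega)]
  simp only [pt]
  by_cases hP1 : r1 = (a:Int) <;> by_cases hP2 : r2 + 1 = (a:Int) <;>
    by_cases hQ1 : c1 = (b:Int) <;> by_cases hQ2 : c2 + 1 = (b:Int) <;>
    simp only [hP1, hP2, hQ1, hQ2, eq_self_iff_true, iff_false, eq_false, and_self,
      true_and, and_true, and_false, false_and, if_true, if_false, ite_true, ite_false] <;>
    split_ifs <;> first | (exfalso; omega) | ring | simp

lemma get2_foldA (N M : Nat) (a b : Nat) (ha : a ≤ N) (hb : b ≤ M) :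
    ∀ (skill : List (List Int)) (ps : List (List Int)), Shape ps (N+1) (M+1) →
    (∀ s ∈ skill, SkOK N M s) →
    get2 (skill.foldl stepA ps) a b = get2 ps a b + (skill.map (fun s => d4 s a b)).sum := by
  intro skill
  induction skill with
  | nil => intro ps _ _; simp
  | cons s ss ih =>
    intro ps hS hsk
    simp only [List.foldl_cons, List.map_cons, List.sum_cons]
    rw [ih _ (shape_stepA hS s) (fun x hx => hsk x (List.mem_cons_of_mem _ hx)),
        get2_stepA ps N M s (hsk s List.mem_cons_self) hS a b ha hb]
    ring

lemma rowfold (N M i : Nat) (hi : i < N) :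
    ∀ k, k ≤ M → ∀ ps, Shape ps (N+1) (M+1) → ∀ a b, a ≤ N → b ≤ M →
    get2 ((List.range k).foldl (fun ps (j : Nat) => addAt2 ps (i:Int) ((j:Int)+1) (get2 ps i j)) ps) a b
      = if a = i ∧ b ≤ k then ∑ j' ∈ Finset.range (b+1), get2 ps i j' else get2 ps a b := by
  intro k
  induction k with
  | zero =>
    intro _ ps hS a b ha hb
    simp only [List.range_zero, List.foldl_nil]
    split_ifs with h
    · obtain ⟨h1, h2⟩ := h
      have hb0 : b = 0 := by omega
      subst h1; subst hb0
      simp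
    · rfl
  | succ k ih =>
    intro hk ps hS a b ha hb
    have hk' : k ≤ M := by omega
    rw [List.range_succ, List.foldl_append, List.foldl_cons, List.foldl_nil]
    set F := (List.range k).foldl (fun ps (j : Nat) => addAt2 ps (i:Int) ((j:Int)+1) (get2 ps i j)) ps with hF
    have hSF : Shape F (N+1) (M+1) :=
      shape_foldl _ _ ps hS (fun m' x _ h => shape_addAt2 h _ _ _)
    rw [get2_addAt2 F (i:Int) ((k:Int)+1) _ a b (by omega) (by omega)
      (by have := hSF.1; omega) (by rw [hSF.2 a (by omega)]; omega)]
    rw [ih hk' ps hS a b ha hb, ih hk' ps hS i k (by omega) (by omega)]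
    rw [if_pos (⟨rfl, le_refl k⟩ : i = i ∧ k ≤ k)]
    by_cases hab : a = i ∧ b = k+1
    · obtain ⟨h1, h2⟩ := hab
      rw [if_pos (⟨by omega, by omega⟩ : (i:Int) = (a:Int) ∧ (k:Int)+1 = (b:Int)),
          if_neg (by omega : ¬(a = i ∧ b ≤ k)), if_pos (by omega : a = i ∧ b ≤ k+1), h1, h2]
      simp only [Finset.sum_range_succ]
      ring
    · rw [if_neg ((by intro hh; obtain ⟨hh1, hh2⟩ := hh; exact hab ⟨by omega, by omega⟩) : ¬((i:Int) = (a:Int) ∧ (k:Int)+1 = (b:Int))), add_zero]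
      split_ifs <;> first | rfl | (exfalso; omega)

lemma shape_rowPass {ps : List (List Int)} {N M : Nat} (h : Shape ps (N+1) (M+1)) (i : Nat) :
    Shape (rowPass M ps i) (N+1) (M+1) :=
  shape_foldl _ _ ps h (fun m' x _ hx => shape_addAt2 hx _ _ _)

lemma shape_colPass {ps : List (List Int)} {N M : Nat} (h : Shape ps (N+1) (M+1)) (j : Nat) :
    Shape (colPass N ps j) (N+1) (M+1) :=
  shape_foldl _ _ ps h (fun m' x _ hx => shape_addAt2 hx _ _ _)

lemma rowpass_outer (N M : Nat) :
    ∀ k, k ≤ N → ∀ ps, Shape ps (N+1) (M+1) → ∀ a b, a ≤ N → b ≤ M →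
    get2 ((List.range k).foldl (rowPass M) ps) a b
      = if a < k then ∑ j' ∈ Finset.range (b+1), get2 ps a j' else get2 ps a b := by
  intro k
  induction k with
  | zero =>
    intro _ ps hS a b ha hb
    simp
  | succ k ih =>
    intro hk ps hS a b ha hb
    have hk' : k ≤ N := by omega
    rw [List.range_succ, List.foldl_append, List.foldl_cons, List.foldl_nil]
    set G := (List.range k).foldl (rowPass M) ps with hG
    have hSG : Shape G (N+1) (M+1) :=
      shape_foldl _ _ ps hS (fun m' x _ h => shape_rowPass h x)
    rw [show rowPass M G k = (List.range M).foldl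
        (fun ps (j : Nat) => addAt2 ps ((k:Nat):Int) ((j:Int)+1) (get2 ps k j)) G from rfl]
    rw [rowfold N M k (by omega) M (le_refl M) G hSG a b ha hb]
    by_cases hak : a = k
    · rw [if_pos ⟨hak, hb⟩, if_pos (by omega : a < k+1), hak]
      refine Finset.sum_congr rfl (fun j' hj' => ?_)
      have hj'b : j' ≤ b := by have := Finset.mem_range.mp hj'; omega
      rw [ih hk' ps hS k j' (by omega) (by omega), if_neg (by omega : ¬ k < k)]
    · rw [if_neg (fun hh => hak hh.1)]
      rw [ih hk' ps hS a b ha hb]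
      split_ifs <;> first | rfl | (exfalso; omega)

lemma colfold (N M j : Nat) (hj : j < M) :
    ∀ k, k ≤ N → ∀ ps, Shape ps (N+1) (M+1) → ∀ a b, a ≤ N → b ≤ M →
    get2 ((List.range k).foldl (fun ps (i : Nat) => addAt2 ps ((i:Int)+1) (j:Int) (get2 ps i j)) ps) a b
      = if b = j ∧ a ≤ k then ∑ i' ∈ Finset.range (a+1), get2 ps i' j else get2 ps a b := by
  intro k
  induction k with
  | zero =>
    intro _ ps hS a b ha hb
    simp only [List.range_zero, List.foldl_nil]
    split_ifs with h
    · obtain ⟨h1, h2⟩ := h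
      have ha0 : a = 0 := by omega
      subst h1; subst ha0
      simp
    · rfl
  | succ k ih =>
    intro hk ps hS a b ha hb
    have hk' : k ≤ N := by omega
    rw [List.range_succ, List.foldl_append, List.foldl_cons, List.foldl_nil]
    set F := (List.range k).foldl (fun ps (i : Nat) => addAt2 ps ((i:Int)+1) (j:Int) (get2 ps i j)) ps with hF
    have hSF : Shape F (N+1) (M+1) :=
      shape_foldl _ _ ps hS (fun m' x _ h => shape_addAt2 h _ _ _)
    rw [get2_addAt2 F ((k:Int)+1) (j:Int) _ a b (by omega) (by omega)
      (by have := hSF.1; omega) (by rw [hSF.2 a (by omega)]; omega)]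
    rw [ih hk' ps hS a b ha hb, ih hk' ps hS k j (by omega) (by omega)]
    rw [if_pos (⟨rfl, le_refl k⟩ : j = j ∧ k ≤ k)]
    by_cases hab : a = k+1 ∧ b = j
    · obtain ⟨h1, h2⟩ := hab
      rw [if_pos (⟨by omega, by omega⟩ : (k:Int)+1 = (a:Int) ∧ (j:Int) = (b:Int)),
          if_neg (by omega : ¬(b = j ∧ a ≤ k)), if_pos (by omega : b = j ∧ a ≤ k+1), h1, h2]
      simp only [Finset.sum_range_succ]
      ring
    · rw [if_neg ((by intro hh; obtain ⟨hh1, hh2⟩ := hh; exact hab ⟨by omega, by omega⟩) : ¬((k:Int)+1 = (a:Int) ∧ (j:Int) = (b:Int))), add_zero]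
      split_ifs <;> first | rfl | (exfalso; omega)

lemma colpass_outer (N M : Nat) :
    ∀ k, k ≤ M → ∀ ps, Shape ps (N+1) (M+1) → ∀ a b, a ≤ N → b ≤ M →
    get2 ((List.range k).foldl (colPass N) ps) a b
      = if b < k then ∑ i' ∈ Finset.range (a+1), get2 ps i' b else get2 ps a b := by
  intro k
  induction k with
  | zero =>
    intro _ ps hS a b ha hb
    simp
  | succ k ih =>
    intro hk ps hS a b ha hb
    have hk' : k ≤ M := by omega
    rw [List.range_succ, List.foldl_append, List.foldl_cons, List.foldl_nil]
    set G := (List.range k).foldl (colPass N) ps with hG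
    have hSG : Shape G (N+1) (M+1) :=
      shape_foldl _ _ ps hS (fun m' x _ h => shape_colPass h x)
    rw [show colPass N G k = (List.range N).foldl
        (fun ps (i : Nat) => addAt2 ps ((i:Int)+1) ((k:Nat):Int) (get2 ps i k)) G from rfl]
    rw [colfold N M k (by omega) N (le_refl N) G hSG a b ha hb]
    by_cases hbk : b = k
    · rw [if_pos ⟨hbk, ha⟩, if_pos (by omega : b < k+1), hbk]
      refine Finset.sum_congr rfl (fun i' hi' => ?_)
      have hi'a : i' ≤ a := by have := Finset.mem_range.mp hi'; omega
      rw [ih hk' ps hS i' k (by omega) (by omega), if_neg (by omega : ¬ k < k)]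
    · rw [if_neg (fun hh => hbk hh.1)]
      rw [ih hk' ps hS a b ha hb]
      split_ifs <;> first | rfl | (exfalso; omega)

lemma shape_pyfold {N M : Nat} (i val : Int) (l : List Int) (m : List (List Int))
    (h : Shape m N M) : Shape (l.foldl (fun m j => addAt2 m i j val) m) N M :=
  shape_foldl _ _ m h (fun m' x _ hx => shape_addAt2 hx _ _ _)

lemma innerB (N M : Nat) (i c2 val : Int) (hi : 0 ≤ i) (a b : Nat) (ha : a < N) (hb : b < M) :
    ∀ (n : Nat) (c1 : Int) (m : List (List Int)), (c2+1-c1).toNat = n → 0 ≤ c1 → Shape m N M →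
    get2 ((PySem.List.pyRange c1 (c2+1) 1).foldl (fun m j => addAt2 m i j val) m) a b
      = get2 m a b + (if i = (a:Int) ∧ c1 ≤ (b:Int) ∧ (b:Int) ≤ c2 then val else 0) := by
  intro n
  induction n with
  | zero =>
    intro c1 m hn hc1 hS
    rw [PySem.List.pyRange_one_eq_nil (by omega), List.foldl_nil,
      if_neg ((by intro hh; obtain ⟨h1, h2, h3⟩ := hh; omega) :
        ¬(i = (a:Int) ∧ c1 ≤ (b:Int) ∧ (b:Int) ≤ c2)), add_zero]
  | succ n ih =>
    intro c1 m hn hc1 hS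
    rw [PySem.List.pyRange_one_cons (by omega), List.foldl_cons,
      ih (c1+1) (addAt2 m i c1 val) (by omega) (by omega) (shape_addAt2 hS _ _ _),
      get2_addAt2 m i c1 val a b hi hc1 (by have := hS.1; omega) (by rw [hS.2 a ha]; omega)]
    split_ifs <;> omega

lemma outerB (N M : Nat) (r2 c1 c2 val : Int) (hc1 : 0 ≤ c1) (a b : Nat) (ha : a < N) (hb : b < M) :
    ∀ (n : Nat) (r1 : Int) (m : List (List Int)), (r2+1-r1).toNat = n → 0 ≤ r1 → Shape m N M →
    get2 ((PySem.List.pyRange r1 (r2+1) 1).foldl (fun m i =>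
        (PySem.List.pyRange c1 (c2+1) 1).foldl (fun m j => addAt2 m i j val) m) m) a b
      = get2 m a b + (if r1 ≤ (a:Int) ∧ (a:Int) ≤ r2 ∧ c1 ≤ (b:Int) ∧ (b:Int) ≤ c2 then val else 0) := by
  intro n
  induction n with
  | zero =>
    intro r1 m hn hr1 hS
    rw [PySem.List.pyRange_one_eq_nil (show r2+1 ≤ r1 by omega), List.foldl_nil,
      if_neg ((by intro hh; obtain ⟨h1, h2, h3, h4⟩ := hh; omega) :
        ¬(r1 ≤ (a:Int) ∧ (a:Int) ≤ r2 ∧ c1 ≤ (b:Int) ∧ (b:Int) ≤ c2)), add_zero]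
  | succ n ih =>
    intro r1 m hn hr1 hS
    rw [PySem.List.pyRange_one_cons (show r1 < r2+1 by omega), List.foldl_cons,
      ih (r1+1) _ (by omega) (by omega) (shape_pyfold _ _ _ _ hS),
      innerB N M r1 c2 val hr1 a b ha hb (c2+1-c1).toNat c1 m rfl hc1 hS]
    split_ifs <;> omega

lemma shape_stepB {m : List (List Int)} {N M : Nat} (h : Shape m N M) (s : List Int) :
    Shape (stepB m s) N M := by
  unfold stepB
  split
  · exact shape_foldl _ _ m h (fun m' x _ hx => shape_pyfold _ _ _ _ hx)
  · exact h

lemma get2_stepB (m : List (List Int)) (N M : Nat) (s : List Int) (hs : SkOK N M s)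
    (hS : Shape m N M) (a b : Nat) (ha : a < N) (hb : b < M) :
    get2 (stepB m s) a b = get2 m a b + rectDelta s a b := by
  obtain ⟨hlen, h1, h2, h3, h4, h5, h6⟩ := hs
  obtain ⟨t, r1, c1, r2, c2, d, rfl⟩ := exists_six _ hlen
  simp only [List.getD_cons_succ, List.getD_cons_zero] at h1 h2 h3 h4 h5 h6
  simp only [stepB, rectDelta]
  rw [outerB N M r2 c1 c2 _ (by omega) a b ha hb (r2+1-r1).toNat r1 m rfl (by omega) hS]

lemma get2_foldB (N M : Nat) (a b : Nat) (ha : a < N) (hb : b < M) :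
    ∀ (skill : List (List Int)) (m : List (List Int)), Shape m N M →
    (∀ s ∈ skill, SkOK N M s) →
    get2 (skill.foldl stepB m) a b = get2 m a b + (skill.map (fun s => rectDelta s a b)).sum := by
  intro skill
  induction skill with
  | nil => intro m _ _; simp
  | cons s ss ih =>
    intro m hS hsk
    simp only [List.foldl_cons, List.map_cons, List.sum_cons]
    rw [ih _ (shape_stepB hS s) (fun x hx => hsk x (List.mem_cons_of_mem _ hx)),
        get2_stepB m N M s (hsk s List.mem_cons_self) hS a b ha hb]
    ring

lemma rect_split (v r1 r2 c1 c2 a b : Int) (hr : r1 ≤ r2) (hc : c1 ≤ c2) :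
    (if (r1 ≤ a ∧ a ≤ r2 ∧ c1 ≤ b ∧ b ≤ c2) then v else 0)
      = v * ((if r1 ≤ a then (1:Int) else 0) - (if r2+1 ≤ a then 1 else 0))
          * ((if c1 ≤ b then (1:Int) else 0) - (if c2+1 ≤ b then 1 else 0)) := by
  split_ifs with h
  all_goals try (exfalso; rcases h with ⟨y1, y2, y3, y4⟩; omega)
  all_goals try ring
  all_goals (exact absurd (⟨by omega, by omega, by omega, by omega⟩) h)

lemma sum_sum_d4 (N M : Nat) (s : List Int) (hs : SkOK N M s) (a b : Nat) :
    ∑ i' ∈ Finset.range (a+1), ∑ j' ∈ Finset.range (b+1), d4 s i' j' = rectDelta s a b := by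
  obtain ⟨hlen, h1, h2, h3, h4, h5, h6⟩ := hs
  obtain ⟨t, r1, c1, r2, c2, d, rfl⟩ := exists_six _ hlen
  simp only [List.getD_cons_succ, List.getD_cons_zero] at h1 h2 h3 h4 h5 h6
  simp only [d4, rectDelta]
  set v := if t = 1 then -d else d with hv
  set C := ((if c1 ≤ (b:Int) then (1:Int) else 0) - (if c2+1 ≤ (b:Int) then 1 else 0)) with hC
  have inner : ∀ i', ∑ j' ∈ Finset.range (b+1), v * (pt r1 i' - pt (r2+1) i') * (pt c1 j' - pt (c2+1) j')
      = v * (pt r1 i' - pt (r2+1) i') * C := by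
    intro i'
    rw [← Finset.mul_sum, Finset.sum_sub_distrib, sum_pt c1 (by omega) b, sum_pt (c2+1) (by omega) b]
  rw [Finset.sum_congr rfl (fun i' _ => inner i')]
  have h7 : ∑ i' ∈ Finset.range (a+1), v * (pt r1 i' - pt (r2+1) i') * C
      = (v * C) * ∑ i' ∈ Finset.range (a+1), (pt r1 i' - pt (r2+1) i') := by
    rw [Finset.mul_sum]; exact Finset.sum_congr rfl (fun i' _ => by ring)
  rw [h7, Finset.sum_sub_distrib, sum_pt r1 (by omega) a, sum_pt (r2+1) (by omega) a, hC,
    rect_split v r1 r2 c1 c2 (a:Int) (b:Int) h2 h5]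
  ring

lemma sum_list_swap (n : Nat) (l : List (List Int)) (g : Nat → List Int → Int) :
    ∑ x ∈ Finset.range n, (l.map (g x)).sum = (l.map (fun s => ∑ x ∈ Finset.range n, g x s)).sum := by
  induction l with
  | nil => simp
  | cons s ss ih => simp [Finset.sum_add_distrib, ih]

lemma foldl_range_shift (f : Int → Nat → Int) (g : Nat → Int) :
    ∀ n : Nat, (∀ a i, i < n → f a i = a + g i) → ∀ a : Int,
    (List.range n).foldl f a = a + ∑ i ∈ Finset.range n, g i := by
  intro n
  induction n with
  | zero => intro _ a; simp
  | succ n ih =>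
    intro hf a
    rw [List.range_succ, List.foldl_append, List.foldl_cons, List.foldl_nil,
      ih (fun a i hi => hf a i (by omega)) a, hf _ n (by omega), Finset.sum_range_succ]
    ring

lemma foldl_list_shift {α : Type} (f : Int → α → Int) (g : α → Int) :
    ∀ (l : List α), (∀ a x, x ∈ l → f a x = a + g x) → ∀ a : Int,
    l.foldl f a = a + (l.map g).sum := by
  intro l
  induction l with
  | nil => intro _ a; simp
  | cons x xs ih =>
    intro hf a
    rw [List.foldl_cons, hf a x List.mem_cons_self,
      ih (fun a y hy => hf a y (List.mem_cons_of_mem _ hy)) _]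
    simp only [List.map_cons, List.sum_cons]
    ring

lemma map_sum_eq_range {α : Type} (d : α) (g : α → Int) :
    ∀ (l : List α), (l.map g).sum = ∑ i ∈ Finset.range l.length, g (l.getD i d) := by
  intro l
  induction l with
  | nil => simp
  | cons x xs ih =>
    rw [List.map_cons, List.sum_cons, ih, List.length_cons, Finset.sum_range_succ']
    simp only [List.getD_cons_succ, List.getD_cons_zero]
    ring

-- ===== VERDICT (by name: the statement is the Claim_ definition above) =====
theorem solution_spec : Claim_equal_solution := by
  intro board skill _ hpre
  obtain ⟨hne, hrect, hsk⟩ := hpre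
  unfold Spec_solution solution solution_alt
  dsimp only
  set N := board.length with hNdef
  set M := (board.headD []).length with hMdef
  set ps1 := List.foldl stepA (List.replicate (N+1) (List.replicate (M+1) (0:Int))) skill with hps1def
  set ps2 := List.foldl (rowPass M) ps1 (List.range N) with hps2def
  set ps3 := List.foldl (colPass N) ps2 (List.range M) with hps3def
  set B' := List.foldl stepB board skill with hB'def
  have hSb : Shape board N M := by
    refine ⟨hNdef.symm, ?_⟩
    intro a ha
    have ha' : a < board.length := by omega
    rw [List.getD_eq_getElem board [] ha']
    exact hrect _ (List.getElem_mem ha')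
  have hskOK : ∀ s ∈ skill, SkOK N M s := by
    intro s hs; unfold SkOK; exact hsk s hs
  have hS0 := shape_ps0 N M
  have hS1 : Shape ps1 (N+1) (M+1) := by
    rw [hps1def]; exact shape_foldl _ _ _ hS0 (fun m' x _ h => shape_stepA h x)
  have hS2 : Shape ps2 (N+1) (M+1) := by
    rw [hps2def]; exact shape_foldl _ _ _ hS1 (fun m' x _ h => shape_rowPass h x)
  have hSB' : Shape B' N M := by
    rw [hB'def]; exact shape_foldl _ _ _ hSb (fun m' x _ h => shape_stepB h x)
  have hps1c : ∀ a b, a ≤ N → b ≤ M → get2 ps1 a b = (skill.map (fun s => d4 s a b)).sum := by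
    intro a b ha hb
    rw [hps1def, get2_foldA N M a b ha hb skill _ hS0 hskOK, get2_ps0, zero_add]
  have hps2c : ∀ a b, a < N → b ≤ M → get2 ps2 a b = ∑ j' ∈ Finset.range (b+1), get2 ps1 a j' := by
    intro a b ha hb
    rw [hps2def, rowpass_outer N M N (le_refl N) ps1 hS1 a b (by omega) hb, if_pos ha]
  have hps3c : ∀ a b, a < N → b < M → get2 ps3 a b = (skill.map (fun s => rectDelta s a b)).sum := by
    intro a b ha hb
    rw [hps3def, colpass_outer N M M (le_refl M) ps2 hS2 a b (by omega) (by omega), if_pos hb]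
    rw [Finset.sum_congr rfl
      (fun i' hi' => hps2c i' b (by have h1 := Finset.mem_range.mp hi'; omega) (by omega))]
    rw [Finset.sum_congr rfl (fun i' hi' => Finset.sum_congr rfl
      (fun j' hj' => hps1c i' j'
        (by have h1 := Finset.mem_range.mp hi'; omega)
        (by have h1 := Finset.mem_range.mp hj'; omega)))]
    rw [Finset.sum_congr rfl
      (fun i' _ => sum_list_swap (b+1) skill (fun j' s => d4 s i' j'))]
    rw [sum_list_swap (a+1) skill (fun i' s => ∑ j' ∈ Finset.range (b+1), d4 s i' j')]
    exact congrArg List.sum (List.map_congr_left (fun s hs => sum_sum_d4 N M s (hskOK s hs) a b))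
  have hBc : ∀ a b, a < N → b < M →
      get2 B' a b = get2 board a b + (skill.map (fun s => rectDelta s a b)).sum := by
    intro a b ha hb
    rw [hB'def]; exact get2_foldB N M a b ha hb skill board hSb hskOK
  rw [foldl_range_shift _
      (fun i => ∑ j ∈ Finset.range M, (if get2 board i j + get2 ps3 i j > 0 then (1:Int) else 0)) N
      (fun a i _ => foldl_range_shift _
        (fun j => if get2 board i j + get2 ps3 i j > 0 then (1:Int) else 0) M
        (fun a j _ => by dsimp only; split_ifs <;> ring) a) 0]
  rw [foldl_list_shift _ (fun row => (row.map (fun v => if v > 0 then (1:Int) else 0)).sum) B'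
      (fun a row _ => foldl_list_shift _ (fun v => if v > 0 then (1:Int) else 0) row
        (fun a v _ => by dsimp only; split_ifs <;> ring) a) 0]
  rw [zero_add, zero_add]
  rw [map_sum_eq_range ([]:List Int) _ B', hSB'.1]
  refine Finset.sum_congr rfl (fun i hi => ?_)
  have hiN : i < N := Finset.mem_range.mp hi
  rw [map_sum_eq_range (0:Int) _ (B'.getD i []), hSB'.2 i hiN]
  refine Finset.sum_congr rfl (fun j hj => ?_)
  have hjM : j < M := Finset.mem_range.mp hj
  rw [show (B'.getD i []).getD j 0 = get2 B' i j from rfl,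
    hBc i j hiN hjM, hps3c i j hiN hjM]
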